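-- pv_equiv track=rewrite | github.com/GizawAAiT/Codeforces | D_Remove_Two_Letters.py | count_distinct_fast
-- ===== SOURCE A (Python) =====
-- def count_distinct_fast(sequence):
--     if len(sequence) < 2:
--         return 0
--
--     n = len(sequence)
--     base = 256
--     mod = 10**9 + 7
--
--     hashes = set()
--     prefix_hash = [0] * (n + 1)
--     pow_base = [1] * (n + 1)
--
--     # Precompute prefix hashes and base powers
--     for i in range(n):
--         prefix_hash[i + 1] = (prefix_hash[i] * base
--             + ord(sequence[i])) % mod
--         pow_base[i + 1] = (pow_base[i] * base) % mod
--
--     for i in range(n - 1):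
--         # Hash of substring excluding characters at i and i+1
--         left_hash = prefix_hash[i]
--         right_hash = (prefix_hash[n] - prefix_hash[i + 2]
--             * pow_base[n - (i + 2)]) % mod
--         combined_hash = (left_hash * pow_base[n - (i + 2)]
--             + right_hash) % mod
--         hashes.add(combined_hash)
--     return len(hashes)
-- ===== SOURCE B (Python) =====
-- def count_distinct_fast(sequence):
--     if len(sequence) < 2:
--         return 0
--     mod = 10**9 + 7
--     n = len(sequence)
--     hashes = set()
--     for i in range(n - 1):
--         h = 0
--         for ch in sequence[:i] + sequence[i + 2:]:
--             h = (h * 256 + ord(ch)) % mod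
--         hashes.add(h)
--     return len(hashes)
-- ===== Notes on version B (the rewrite author's own statement) =====
-- stated objective: simpler
-- what changed: Replaces the rolling prefix-hash/power arrays and the algebraic hash-combination of the two halves by a direct Horner evaluation mod 10^9+7 of each candidate string with the two letters removed; same set-of-hashes count, no precomputed arrays.
import Mathlib
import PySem

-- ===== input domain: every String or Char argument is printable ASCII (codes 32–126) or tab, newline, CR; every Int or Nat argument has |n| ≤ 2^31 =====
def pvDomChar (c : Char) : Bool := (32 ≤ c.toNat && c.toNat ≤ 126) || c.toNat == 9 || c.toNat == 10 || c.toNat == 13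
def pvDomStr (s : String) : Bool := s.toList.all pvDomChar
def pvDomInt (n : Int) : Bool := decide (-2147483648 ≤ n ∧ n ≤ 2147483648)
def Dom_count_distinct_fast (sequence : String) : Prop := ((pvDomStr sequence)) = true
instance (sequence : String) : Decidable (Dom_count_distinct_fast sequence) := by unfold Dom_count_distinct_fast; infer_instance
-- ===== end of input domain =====

-- B replaces A's rolling prefix-hash/power arrays by a direct Horner evaluation (mod 10^9+7)
-- of each candidate string with the two adjacent letters removed: simpler, no precomputed arrays
-- (O(n^2) instead of O(n); not faster).

-- ===== PORT A =====
-- prefix_hash array: prefix_hash[i+1] = (prefix_hash[i] * 256 + ord(sequence[i])) % mod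
def pvPrefArr (h : Int) (cs : List Int) : List Int :=
  match cs with
  | [] => [h]
  | c :: rest => h :: pvPrefArr (PySem.Int.mod (h * 256 + c) 1000000007) rest

-- pow_base array: pow_base[i+1] = (pow_base[i] * 256) % mod
def pvPowArr (h : Int) (cs : List Int) : List Int :=
  match cs with
  | [] => [h]
  | _ :: rest => h :: pvPowArr (PySem.Int.mod (h * 256) 1000000007) rest

def count_distinct_fast (sequence : String) : Int :=
  if PySem.Str.len sequence < 2 then 0
  else
    let cs := sequence.toList.map (fun c => (c.toNat : Int))
    let n := cs.length
    let ph := pvPrefArr 0 cs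
    let pw := pvPowArr 1 cs
    let hashes : PySem.Set Int :=
      (List.range (n - 1)).foldl (fun hs i =>
        let left_hash := ph.getD i 0
        let right_hash := PySem.Int.mod (ph.getD n 0 - ph.getD (i + 2) 0 * pw.getD (n - (i + 2)) 0) 1000000007
        PySem.Set.add hs (PySem.Int.mod (left_hash * pw.getD (n - (i + 2)) 0 + right_hash) 1000000007))
        PySem.Set.empty
    (hashes.length : Int)

-- ===== PORT B =====
-- h accumulated over the removed-pair candidate: h = (h * 256 + ord(ch)) % mod
def pvHorner (h : Int) (l : List Int) : Int :=
  l.foldl (fun h c => PySem.Int.mod (h * 256 + c) 1000000007) h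

def count_distinct_fast_alt (sequence : String) : Int :=
  if PySem.Str.len sequence < 2 then 0
  else
    let cs := sequence.toList.map (fun c => (c.toNat : Int))
    let n := cs.length
    let hashes : PySem.Set Int :=
      (List.range (n - 1)).foldl (fun hs i =>
        PySem.Set.add hs (pvHorner 0 (cs.take i ++ cs.drop (i + 2))))
        PySem.Set.empty
    (hashes.length : Int)

-- ===== PRECONDITION & SPEC =====
def Spec_count_distinct_fast (sequence : String) (out : Int) : Prop := out = count_distinct_fast_alt sequence
instance (sequence : String) (out : Int) : Decidable (Spec_count_distinct_fast sequence out) := by unfold Spec_count_distinct_fast; infer_instance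

-- ===== CLAIM (what is proved, stated in full; the proofs are below) =====
def Claim_equal_count_distinct_fast : Prop := ∀ (sequence : String), Dom_count_distinct_fast sequence → Spec_count_distinct_fast sequence (count_distinct_fast sequence)

-- ===== LEMMAS AND PROOFS =====

-- raw (un-reduced) base-256 value of a list of codes, Horner style
def pvVal (h : Int) (l : List Int) : Int :=
  l.foldl (fun h c => h * 256 + c) h

lemma pvM_pos : (0:Int) < 1000000007 := by norm_num

lemma pv_em (x : Int) : x % 1000000007 ≡ x [ZMOD 1000000007] :=
  Int.emod_emod_of_dvd x dvd_rfl

lemma pvHorner_emod (l : List Int) : ∀ h : Int,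
    pvHorner (h % 1000000007) l = pvVal h l % 1000000007 := by
  induction l with
  | nil => intro h; simp [pvHorner, pvVal]
  | cons c l ih =>
    intro h
    have hstep : (h % 1000000007 * 256 + c) % 1000000007 = (h * 256 + c) % 1000000007 :=
      ((pv_em h).mul_right 256).add_right c
    simp only [pvHorner, pvVal, List.foldl_cons] at *
    rw [PySem.Int.mod_eq_emod_of_pos pvM_pos, hstep, ih (h * 256 + c)]

lemma pvHorner_zero (l : List Int) : pvHorner 0 l = pvVal 0 l % 1000000007 := by
  have := pvHorner_emod l 0
  simpa using this

lemma pvVal_shift (l : List Int) : ∀ h : Int,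
    pvVal h l = h * 256 ^ l.length + pvVal 0 l := by
  induction l with
  | nil => intro h; simp [pvVal]
  | cons c l ih =>
    intro h
    simp only [pvVal, List.foldl_cons] at *
    rw [ih (h * 256 + c), ih (0 * 256 + c)]
    simp [List.length_cons]
    ring

lemma pvVal_append (a b : List Int) :
    pvVal 0 (a ++ b) = pvVal 0 a * 256 ^ b.length + pvVal 0 b := by
  have h1 : pvVal 0 (a ++ b) = pvVal (pvVal 0 a) b := by
    simp [pvVal, List.foldl_append]
  rw [h1, pvVal_shift b (pvVal 0 a)]

lemma pvPrefArr_getD (cs : List Int) : ∀ (h : Int) (i : Nat), i ≤ cs.length →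
    (pvPrefArr h cs).getD i 0 = pvHorner h (cs.take i) := by
  induction cs with
  | nil =>
    intro h i hi
    have hz : i = 0 := by simpa using hi
    subst hz
    simp [pvPrefArr, pvHorner]
  | cons c cs ih =>
    intro h i hi
    cases i with
    | zero => simp [pvPrefArr, pvHorner]
    | succ i =>
      simp only [pvPrefArr, List.getD_cons_succ, List.take_succ_cons]
      rw [ih _ i (by simpa using hi)]
      simp [pvHorner]

lemma pvPowArr_getD (cs : List Int) : ∀ (h : Int) (i : Nat), i ≤ cs.length →
    (pvPowArr (h % 1000000007) cs).getD i 0 = (h * 256 ^ i) % 1000000007 := by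
  induction cs with
  | nil =>
    intro h i hi
    have hz : i = 0 := by simpa using hi
    subst hz
    simp [pvPowArr]
  | cons c cs ih =>
    intro h i hi
    cases i with
    | zero => simp [pvPowArr]
    | succ i =>
      simp only [pvPowArr, List.getD_cons_succ]
      rw [PySem.Int.mod_eq_emod_of_pos pvM_pos]
      have hstep : h % 1000000007 * 256 % 1000000007 = (h * 256) % 1000000007 :=
        (pv_em h).mul_right 256
      rw [hstep, ih (h * 256) i (by simpa using hi)]
      ring_nf

-- the element A adds at index i equals the element B adds at index i
lemma pv_elem_eq (cs : List Int) (i : Nat) (hi : i + 2 ≤ cs.length) :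
    PySem.Int.mod
      ((pvPrefArr 0 cs).getD i 0 * (pvPowArr 1 cs).getD (cs.length - (i + 2)) 0 +
        PySem.Int.mod
          ((pvPrefArr 0 cs).getD cs.length 0 -
            (pvPrefArr 0 cs).getD (i + 2) 0 * (pvPowArr 1 cs).getD (cs.length - (i + 2)) 0)
          1000000007)
      1000000007
    = pvHorner 0 (cs.take i ++ cs.drop (i + 2)) := by
  have h1 : (1:Int) = 1 % 1000000007 := by norm_num
  have e : (cs.drop (i + 2)).length = cs.length - (i + 2) := List.length_drop ..
  have hpw : (pvPowArr 1 cs).getD (cs.length - (i + 2)) 0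
      = (256 ^ (cs.length - (i + 2)) : Int) % 1000000007 := by
    rw [h1, pvPowArr_getD cs 1 _ (by omega)]; ring_nf
  have hph : ∀ j : Nat, j ≤ cs.length →
      (pvPrefArr 0 cs).getD j 0 = pvVal 0 (cs.take j) % 1000000007 := by
    intro j hj
    rw [pvPrefArr_getD cs 0 j hj, pvHorner_zero]
  -- rewrite every array access
  rw [PySem.Int.mod_eq_emod_of_pos pvM_pos, PySem.Int.mod_eq_emod_of_pos pvM_pos,
    hpw, hph i (by omega), hph (i + 2) hi, hph cs.length le_rfl,
    pvHorner_zero, List.take_length]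
  -- decompose the full value
  have hsplit : pvVal 0 cs
      = pvVal 0 (cs.take (i + 2)) * 256 ^ (cs.length - (i + 2)) + pvVal 0 (cs.drop (i + 2)) := by
    conv_lhs => rw [← List.take_append_drop (i + 2) cs]
    rw [pvVal_append, e]
  -- pure congruence mod 1000000007
  have hcong :
      (pvVal 0 (cs.take i) % 1000000007) * (256 ^ (cs.length - (i + 2)) % 1000000007) +
        (pvVal 0 cs % 1000000007 -
          (pvVal 0 (cs.take (i + 2)) % 1000000007) * (256 ^ (cs.length - (i + 2)) % 1000000007)) % 1000000007
      ≡ pvVal 0 (cs.take i ++ cs.drop (i + 2)) [ZMOD 1000000007] := by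
    have hA := (pv_em (pvVal 0 (cs.take i))).mul (pv_em (256 ^ (cs.length - (i + 2))))
    have hB := (pv_em (pvVal 0 cs)).sub
      ((pv_em (pvVal 0 (cs.take (i + 2)))).mul (pv_em (256 ^ (cs.length - (i + 2)))))
    have hC := (pv_em _).trans hB
    have := hA.add hC
    refine this.trans ?_
    rw [pvVal_append, e, hsplit]
    ring_nf
    exact Int.ModEq.refl _
  exact hcong

lemma pv_sets_eq (cs : List Int) (h2 : 2 ≤ cs.length) :
    (List.range (cs.length - 1)).foldl (fun hs i =>
        let left_hash := (pvPrefArr 0 cs).getD i 0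
        let right_hash := PySem.Int.mod
          ((pvPrefArr 0 cs).getD cs.length 0 -
            (pvPrefArr 0 cs).getD (i + 2) 0 * (pvPowArr 1 cs).getD (cs.length - (i + 2)) 0)
          1000000007
        PySem.Set.add hs (PySem.Int.mod (left_hash * (pvPowArr 1 cs).getD (cs.length - (i + 2)) 0 + right_hash) 1000000007))
      PySem.Set.empty
    = (List.range (cs.length - 1)).foldl (fun hs i =>
        PySem.Set.add hs (pvHorner 0 (cs.take i ++ cs.drop (i + 2)))) PySem.Set.empty := by
  apply PySem.List.foldl_congr_mem
  intro acc i hi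
  have hi' : i + 2 ≤ cs.length := by
    have := List.mem_range.mp hi; omega
  simp only
  rw [pv_elem_eq cs i hi']

-- ===== VERDICT (by name: the statement is the Claim_ definition above) =====
theorem count_distinct_fast_spec : Claim_equal_count_distinct_fast := by
  intro sequence _
  unfold Spec_count_distinct_fast count_distinct_fast count_distinct_fast_alt
  split
  · rfl
  · rename_i hlen
    simp only
    rw [pv_sets_eq]
    have : ¬ ((sequence.toList.length : Int) < 2) := by
      rwa [← PySem.Str.len_eq]
    simp only [List.length_map]
    omega
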